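-- pv_equiv track=rewrite | github.com/ckf42/leetcode-code | sol/2359/2359.py | closestMeetingNode
-- ===== SOURCE A (Python) =====
-- from typing import List
--
-- def closestMeetingNode(edges: List[int], node1: int, node2: int) -> int:
--     n = len(edges)
--     d1 = [n + 1] * n
--     dist = 0
--     visited = [False] * n
--     while node1 != -1 and not visited[node1]:
--         visited[node1] = True
--         d1[node1] = dist
--         node1 = edges[node1]
--         dist += 1
--     res = -1
--     minDist = n + 1
--     dist = 0
--     visited = [False] * n
--     while node2 != -1 and not visited[node2]:
--         visited[node2] = True
--         r = max(d1[node2], dist)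
--         if r < minDist or (r == minDist and node2 < res):
--             res = node2
--             minDist = r
--         dist += 1
--         node2 = edges[node2]
--     return res
-- ===== SOURCE B (Python) =====
-- from typing import List
--
-- def _walkDists(edges: List[int], node: int) -> List[int]:
--     n = len(edges)
--     d = [n + 1] * n
--     dist = 0
--     while node != -1 and d[node] == n + 1:
--         d[node] = dist
--         dist += 1
--         node = edges[node]
--     return d
--
-- def closestMeetingNode(edges: List[int], node1: int, node2: int) -> int:
--     n = len(edges)
--     d1 = _walkDists(edges, node1)
--     d2 = _walkDists(edges, node2)
--     res = -1
--     minDist = n + 1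
--     for i in range(n):
--         r = max(d1[i], d2[i])
--         if r < minDist:
--             res = i
--             minDist = r
--     return res
-- ===== Notes on version B (the rewrite author's own statement) =====
-- stated objective: simpler
-- what changed: A fuses distance computation and argmin selection into the second path walk with an explicit tie-break clause; B instead runs two independent distance walks (one shared helper, with d[i]==n+1 itself as the visited guard) and then picks the answer in a single separate ascending scan over all nodes, where plain strict '<' gives the smallest-index tie-break.
-- outside the precondition, e.g. on closestMeetingNode([3, -1], 0, 1): A raises IndexError, B raises IndexError; on closestMeetingNode([-1, 0], 0, -2): A returns -2, B returns 0; on closestMeetingNode([1, -2], 0, 0): A returns 0, B returns 0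
import Mathlib
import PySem

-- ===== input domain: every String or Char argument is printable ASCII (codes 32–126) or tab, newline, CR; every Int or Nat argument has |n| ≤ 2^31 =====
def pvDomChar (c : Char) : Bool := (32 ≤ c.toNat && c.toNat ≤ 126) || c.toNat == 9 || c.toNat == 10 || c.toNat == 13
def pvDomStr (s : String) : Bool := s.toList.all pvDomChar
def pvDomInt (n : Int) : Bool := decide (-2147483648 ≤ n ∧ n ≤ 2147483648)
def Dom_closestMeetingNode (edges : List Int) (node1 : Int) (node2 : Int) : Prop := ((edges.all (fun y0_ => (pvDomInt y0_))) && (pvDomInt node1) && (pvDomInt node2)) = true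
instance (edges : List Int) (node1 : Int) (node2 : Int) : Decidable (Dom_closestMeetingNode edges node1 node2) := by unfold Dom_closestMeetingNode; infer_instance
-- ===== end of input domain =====

-- B replaces A's single fused walk-and-select second pass by two independent
-- distance walks plus one separate ascending argmin scan over all nodes
-- (objective: simpler decomposition; same asymptotic cost).

-- ===== PORT A =====
-- first while loop of A (fuel edges.length + 1 always suffices: every
-- iteration marks one more unvisited slot)
def pvLoopA1 (edges : List Int) (fuel : Nat) (node1 dist : Int)
    (d1 : List Int) (visited : List Bool) : List Int × List Bool :=
  match fuel with
  | 0 => (d1, visited)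
  | f+1 =>
    if node1 = -1 then (d1, visited)
    else if PySem.List.pyGetD visited node1 false then (d1, visited)
    else
      pvLoopA1 edges f (PySem.List.pyGetD edges node1 0) (dist + 1)
        (PySem.List.pySetD d1 node1 dist) (PySem.List.pySetD visited node1 true)

def pvLoopA2 (edges : List Int) (fuel : Nat) (node2 : Int) (d1 : List Int)
    (res minDist dist : Int) (visited : List Bool) : Int :=
  match fuel with
  | 0 => res
  | f+1 =>
    if node2 = -1 then res
    else if PySem.List.pyGetD visited node2 false then res
    else
      let visited' := PySem.List.pySetD visited node2 true
      let r := max (PySem.List.pyGetD d1 node2 0) dist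
      if r < minDist ∨ (r = minDist ∧ node2 < res) then
        pvLoopA2 edges f (PySem.List.pyGetD edges node2 0) d1 node2 r (dist + 1) visited'
      else
        pvLoopA2 edges f (PySem.List.pyGetD edges node2 0) d1 res minDist (dist + 1) visited'

def closestMeetingNode (edges : List Int) (node1 : Int) (node2 : Int) : Int :=
  let n : Int := edges.length
  let st := pvLoopA1 edges (edges.length + 1) node1 0
    (List.replicate edges.length (n + 1)) (List.replicate edges.length false)
  pvLoopA2 edges (edges.length + 1) node2 st.1 (-1) (n + 1) 0
    (List.replicate edges.length false)
-- ===== PORT B =====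
-- B's helper _walkDists: d[i] = distance from node (n + 1 if unreachable)
def pvWalk (edges : List Int) (fuel : Nat) (node dist : Int) (d : List Int) : List Int :=
  match fuel with
  | 0 => d
  | f+1 =>
    if node = -1 then d
    else if PySem.List.pyGetD d node 0 = (edges.length : Int) + 1 then
      pvWalk edges f (PySem.List.pyGetD edges node 0) (dist + 1)
        (PySem.List.pySetD d node dist)
    else d

def closestMeetingNode_alt (edges : List Int) (node1 : Int) (node2 : Int) : Int :=
  let n : Int := edges.length
  let d1 := pvWalk edges (edges.length + 1) node1 0 (List.replicate edges.length (n + 1))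
  let d2 := pvWalk edges (edges.length + 1) node2 0 (List.replicate edges.length (n + 1))
  ((PySem.List.pyRange 0 n 1).foldl (fun (s : Int × Int) i =>
      let r := max (PySem.List.pyGetD d1 i 0) (PySem.List.pyGetD d2 i 0)
      if r < s.2 then (i, r) else s) (-1, n + 1)).1

-- ===== PRECONDITION & SPEC =====
-- successor map of the graph: -1 and (Python-wraparound) in-range indices step
-- to the pointed-to node, anything else is stuck (used only to state Pre_)
def pvStep (edges : List Int) (x : Int) : Int :=
  if x = -1 then -1
  else if -(edges.length : Int) ≤ x ∧ x < (edges.length : Int) then PySem.List.pyGetD edges x 0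
  else x

-- Pre_ is the problem's natural domain: every node on the walk from node1 stays
-- -1 or an in-range (possibly negative, wraparound) index, and every node on the
-- walk from node2 stays -1 or a plain index 0..n-1.  Outside it A raises
-- IndexError, or node2's walk passes through negative wraparound labels, where
-- A returns the raw negative label and B the equivalent wrapped index — an
-- accidental corner on which either value is defensible.
def Pre_closestMeetingNode (edges : List Int) (node1 : Int) (node2 : Int) : Prop :=
  (∀ k : Nat, k ≤ edges.length → ((pvStep edges)^[k] node1 = -1 ∨
    (-(edges.length : Int) ≤ (pvStep edges)^[k] node1 ∧ (pvStep edges)^[k] node1 < (edges.length : Int)))) ∧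
  (∀ k : Nat, k ≤ edges.length → ((pvStep edges)^[k] node2 = -1 ∨
    (0 ≤ (pvStep edges)^[k] node2 ∧ (pvStep edges)^[k] node2 < (edges.length : Int))))
instance (edges : List Int) (node1 : Int) (node2 : Int) : Decidable (Pre_closestMeetingNode edges node1 node2) := by unfold Pre_closestMeetingNode; infer_instance

def pvWitness_closestMeetingNode : List Int × Int × Int := ([0, 2, -1], 1, 2)

def Spec_closestMeetingNode (edges : List Int) (node1 : Int) (node2 : Int) (out : Int) : Prop := out = closestMeetingNode_alt edges node1 node2
instance (edges : List Int) (node1 : Int) (node2 : Int) (out : Int) : Decidable (Spec_closestMeetingNode edges node1 node2 out) := by unfold Spec_closestMeetingNode; infer_instance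

-- ===== CLAIM (what is proved, stated in full; the proofs are below) =====
def Claim_equal_closestMeetingNode : Prop := ∀ (edges : List Int) (node1 : Int) (node2 : Int), Dom_closestMeetingNode edges node1 node2 → Pre_closestMeetingNode edges node1 node2 → Spec_closestMeetingNode edges node1 node2 (closestMeetingNode edges node1 node2)

-- ===== LEMMAS AND PROOFS =====
-- wrap-good / natural-good node labels
def pvW (n : Int) (x : Int) : Prop := x = -1 ∨ (-n ≤ x ∧ x < n)

def pvN (n : Int) (x : Int) : Prop := x = -1 ∨ (0 ≤ x ∧ x < n)

-- slot a (possibly negative) in-range label refers to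
def pvIdx (L : Nat) (x : Int) : Nat := if x < 0 then (L + x).toNat else x.toNat

-- the sequence of nodes visited by pvWalk, in visit order
def pvSeq (edges : List Int) (fuel : Nat) (node dist : Int) (d : List Int) : List Int :=
  match fuel with
  | 0 => []
  | f+1 =>
    if node = -1 then []
    else if PySem.List.pyGetD d node 0 = (edges.length : Int) + 1 then
      node :: pvSeq edges f (PySem.List.pyGetD edges node 0) (dist + 1)
        (PySem.List.pySetD d node dist)
    else []

-- "keep the lexicographically (r, index)-smaller candidate" step
def pvSel (k : Int → Int) (s : Int × Int) (i : Int) : Int × Int :=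
  if k i < s.2 ∨ (k i = s.2 ∧ i < s.1) then (i, k i) else s

def pvKey (d1 d2 : List Int) (i : Int) : Int :=
  max (PySem.List.pyGetD d1 i 0) (PySem.List.pyGetD d2 i 0)

theorem pvNW (n : Int) (x : Int) (h : pvN n x) : pvW n x := by
  rcases h with h | h
  · exact Or.inl h
  · exact Or.inr ⟨by omega, h.2⟩

theorem pvGetD_negIdx {α : Type} (xs : List α) (d : α) (i : Int) (h0 : i < 0)
    (h1 : -(xs.length : Int) ≤ i) :
    PySem.List.pyGetD xs i d = xs.getD (xs.length - (-i).toNat) d := by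
  simp [PySem.List.pyGetD, PySem.List.pyGet?, PySem.List.pyIdx?, h1, not_le.mpr h0,
    List.getD_eq_getElem?_getD]

theorem pvSetD_negIdx {α : Type} (xs : List α) (i : Int) (v : α) (h0 : i < 0)
    (h1 : -(xs.length : Int) ≤ i) :
    PySem.List.pySetD xs i v = xs.set (xs.length - (-i).toNat) v := by
  simp [PySem.List.pySetD, PySem.List.pySet?, PySem.List.pyIdx?, h1, not_le.mpr h0]

theorem pvGetD_idx {α : Type} (xs : List α) (c : α) (x : Int)
    (h1 : -(xs.length : Int) ≤ x) (h2 : x < (xs.length : Int)) :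
    PySem.List.pyGetD xs x c = xs.getD (pvIdx xs.length x) c := by
  by_cases h0 : 0 ≤ x
  · rw [PySem.List.pyGetD_of_nonneg (xs := xs) (d := c) h0]
    simp [pvIdx, not_lt.mpr h0]
  · rw [pvGetD_negIdx xs c x (by omega) h1]
    have : xs.length - (-x).toNat = pvIdx xs.length x := by
      simp [pvIdx, (by omega : x < 0)]
      omega
    rw [this]

theorem pvSetD_idx {α : Type} (xs : List α) (x : Int) (v : α)
    (h1 : -(xs.length : Int) ≤ x) (h2 : x < (xs.length : Int)) :
    PySem.List.pySetD xs x v = xs.set (pvIdx xs.length x) v := by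
  by_cases h0 : 0 ≤ x
  · rw [PySem.List.pySetD_of_nonneg xs v h0]
    simp [pvIdx, not_lt.mpr h0]
  · rw [pvSetD_negIdx xs x v (by omega) h1]
    have : xs.length - (-x).toNat = pvIdx xs.length x := by
      simp [pvIdx, (by omega : x < 0)]
      omega
    rw [this]

theorem pvIdx_lt (L : Nat) (x : Int) (h1 : -(L : Int) ≤ x) (h2 : x < (L : Int)) :
    pvIdx L x < L := by
  simp only [pvIdx]
  split_ifs <;> omega

theorem pvStep_eq (edges : List Int) (x : Int) (h1 : x ≠ -1)
    (h2 : -(edges.length : Int) ≤ x) (h3 : x < (edges.length : Int)) :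
    pvStep edges x = PySem.List.pyGetD edges x 0 := by
  simp [pvStep, h1, h2, h3]

theorem pvPath_zero {P : Int → Prop} (edges : List Int) (node : Int) (fuel : Nat)
    (hpath : ∀ k, k < fuel + 1 → P ((pvStep edges)^[k] node)) : P node := by
  have := hpath 0 (by omega)
  simpa using this

theorem pvPath_shift {P : Int → Prop} (edges : List Int) (node : Int) (fuel : Nat)
    (hpath : ∀ k, k < fuel + 1 → P ((pvStep edges)^[k] node))
    (h1 : node ≠ -1) (h2 : -(edges.length : Int) ≤ node) (h3 : node < (edges.length : Int)) :
    ∀ k, k < fuel → P ((pvStep edges)^[k] (PySem.List.pyGetD edges node 0)) := by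
  intro k hk
  have := hpath (k + 1) (by omega)
  rwa [Function.iterate_succ_apply, pvStep_eq edges node h1 h2 h3] at this

theorem pvWalk_preserve (edges : List Int) (fuel : Nat) (node dist : Int) (d : List Int)
    (hld : d.length = edges.length)
    (hpath : ∀ k, k < fuel → pvW (edges.length : Int) ((pvStep edges)^[k] node))
    (i : Nat) (hi : d.getD i 0 ≠ (edges.length : Int) + 1) :
    (pvWalk edges fuel node dist d).getD i 0 = d.getD i 0 := by
  induction fuel generalizing node dist d with
  | zero => rfl
  | succ f ih =>
    simp only [pvWalk]
    split_ifs with h1 h2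
    · rfl
    · have h0 : -(edges.length : Int) ≤ node ∧ node < (edges.length : Int) := by
        rcases pvPath_zero edges node f hpath with h | h
        · exact absurd h h1
        · exact h
      have hgd : PySem.List.pyGetD d node 0 = d.getD (pvIdx edges.length node) 0 := by
        rw [pvGetD_idx d 0 node (by omega) (by omega), hld]
      have hne : pvIdx edges.length node ≠ i := by
        intro he
        rw [hgd, he] at h2
        exact hi h2
      have hset : PySem.List.pySetD d node dist = d.set (pvIdx edges.length node) dist := by
        rw [pvSetD_idx d node dist (by omega) (by omega), hld]
      have hsame : (d.set (pvIdx edges.length node) dist).getD i 0 = d.getD i 0 := by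
        simp [List.getD_eq_getElem?_getD, List.getElem?_set_ne hne]
      rw [hset]
      have hi' : (d.set (pvIdx edges.length node) dist).getD i 0 ≠ (edges.length : Int) + 1 := by
        rw [hsame]; exact hi
      exact (ih _ _ _ (by simp [hld]) (pvPath_shift edges node f hpath h1 h0.1 h0.2) hi').trans hsame
    · rfl

theorem pvWalk_le (edges : List Int) (fuel : Nat) (node dist : Int) (d : List Int)
    (hld : d.length = edges.length)
    (hpath : ∀ k, k < fuel → pvW (edges.length : Int) ((pvStep edges)^[k] node))
    (hall : ∀ i : Nat, d.getD i 0 ≤ (edges.length : Int) + 1)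
    (hd : dist + fuel = (edges.length : Int) + 1) (i : Nat) :
    (pvWalk edges fuel node dist d).getD i 0 ≤ (edges.length : Int) + 1 := by
  induction fuel generalizing node dist d with
  | zero => exact hall i
  | succ f ih =>
    simp only [pvWalk]
    split_ifs with h1 h2
    · exact hall i
    · have h0 : -(edges.length : Int) ≤ node ∧ node < (edges.length : Int) := by
        rcases pvPath_zero edges node f hpath with h | h
        · exact absurd h h1
        · exact h
      have hset : PySem.List.pySetD d node dist = d.set (pvIdx edges.length node) dist := by
        rw [pvSetD_idx d node dist (by omega) (by omega), hld]
      rw [hset]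
      refine ih _ _ _ (by simp [hld]) (pvPath_shift edges node f hpath h1 h0.1 h0.2) ?_
        (by push_cast at hd ⊢; omega)
      intro j
      by_cases hj : j = pvIdx edges.length node
      · have hl : pvIdx edges.length node < d.length := by
          rw [hld]; exact pvIdx_lt edges.length node h0.1 h0.2
        rw [hj]
        simp [List.getD_eq_getElem?_getD, hl]
        push_cast at hd; omega
      · have : (d.set (pvIdx edges.length node) dist).getD j 0 = d.getD j 0 := by
          simp [List.getD_eq_getElem?_getD,
            List.getElem?_set_ne (by omega : pvIdx edges.length node ≠ j)]
        rw [this]; exact hall j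
    · exact hall i

theorem pvSeq_good (edges : List Int) (fuel : Nat) (node dist : Int) (d : List Int)
    (hpath : ∀ k, k < fuel → pvN (edges.length : Int) ((pvStep edges)^[k] node)) :
    ∀ i ∈ pvSeq edges fuel node dist d, 0 ≤ i ∧ i < (edges.length : Int) := by
  induction fuel generalizing node dist d with
  | zero => intro i hi; simp [pvSeq] at hi
  | succ f ih =>
    intro i hi
    simp only [pvSeq] at hi
    split_ifs at hi with h1 h2
    · simp at hi
    · have h0 : 0 ≤ node ∧ node < (edges.length : Int) := by
        rcases pvPath_zero edges node f hpath with h | h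
        · exact absurd h h1
        · exact h
      rcases List.mem_cons.mp hi with rfl | hi'
      · exact h0
      · exact ih _ _ _ (pvPath_shift edges node f hpath h1 (by omega) h0.2) i hi'
    · simp at hi

theorem pvSeq_unvisited (edges : List Int) (fuel : Nat) (node dist : Int) (d : List Int)
    (hpath : ∀ k, k < fuel → pvN (edges.length : Int) ((pvStep edges)^[k] node))
    (hld : d.length = edges.length)
    (hd : dist + fuel = (edges.length : Int) + 1) :
    ∀ i ∈ pvSeq edges fuel node dist d, d.getD i.toNat 0 = (edges.length : Int) + 1 := by
  induction fuel generalizing node dist d with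
  | zero => intro i hi; simp [pvSeq] at hi
  | succ f ih =>
    intro i hi
    simp only [pvSeq] at hi
    split_ifs at hi with h1 h2
    · simp at hi
    · have h0 : 0 ≤ node ∧ node < (edges.length : Int) := by
        rcases pvPath_zero edges node f hpath with h | h
        · exact absurd h h1
        · exact h
      have hgd : PySem.List.pyGetD d node 0 = d.getD node.toNat 0 := by
        rw [PySem.List.pyGetD_of_nonneg (xs := d) (d := (0:Int)) h0.1]
      rcases List.mem_cons.mp hi with rfl | hi'
      · rw [← hgd]; exact h2
      · have hset : PySem.List.pySetD d node dist = d.set node.toNat dist :=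
          PySem.List.pySetD_of_nonneg d dist h0.1
        rw [hset] at hi'
        have hrec := ih _ _ _ (pvPath_shift edges node f hpath h1 (by omega) h0.2)
          (by simpa using hld) (by push_cast at hd ⊢; omega) i hi'
        by_cases hij : i.toNat = node.toNat
        · exfalso
          have hl : node.toNat < d.length := by omega
          rw [hij] at hrec
          rw [List.getD_eq_getElem?_getD] at hrec
          simp [hl] at hrec
          push_cast at hd; omega
        · rw [List.getD_eq_getElem?_getD, List.getElem?_set_ne (by omega : node.toNat ≠ i.toNat)] at hrec
          rw [List.getD_eq_getElem?_getD]
          exact hrec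
    · simp at hi

theorem pvSeq_nodup (edges : List Int) (fuel : Nat) (node dist : Int) (d : List Int)
    (hpath : ∀ k, k < fuel → pvN (edges.length : Int) ((pvStep edges)^[k] node))
    (hld : d.length = edges.length)
    (hd : dist + fuel = (edges.length : Int) + 1) :
    (pvSeq edges fuel node dist d).Nodup := by
  induction fuel generalizing node dist d with
  | zero => simp [pvSeq]
  | succ f ih =>
    simp only [pvSeq]
    split_ifs with h1 h2
    · simp
    · have h0 : 0 ≤ node ∧ node < (edges.length : Int) := by
        rcases pvPath_zero edges node f hpath with h | h
        · exact absurd h h1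
        · exact h
      have hset : PySem.List.pySetD d node dist = d.set node.toNat dist :=
        PySem.List.pySetD_of_nonneg d dist h0.1
      refine List.nodup_cons.mpr ⟨?_, ?_⟩
      · intro hmem
        have := pvSeq_unvisited edges f (PySem.List.pyGetD edges node 0) (dist + 1)
          (PySem.List.pySetD d node dist)
          (pvPath_shift edges node f hpath h1 (by omega) h0.2)
          (by simp [hset]; simpa using hld) (by push_cast at hd ⊢; omega) node hmem
        rw [hset] at this
        have hl : node.toNat < d.length := by omega
        rw [List.getD_eq_getElem?_getD] at this
        simp [hl] at this
        push_cast at hd; omega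
      · exact ih _ _ _ (pvPath_shift edges node f hpath h1 (by omega) h0.2)
          (by simp [hset]; simpa using hld) (by push_cast at hd ⊢; omega)
    · simp

theorem pvWalk_unreached (edges : List Int) (fuel : Nat) (node dist : Int) (d : List Int)
    (hpath : ∀ k, k < fuel → pvN (edges.length : Int) ((pvStep edges)^[k] node))
    (i : Nat) (hi : d.getD i 0 = (edges.length : Int) + 1)
    (hmem : (i : Int) ∉ pvSeq edges fuel node dist d) :
    (pvWalk edges fuel node dist d).getD i 0 = (edges.length : Int) + 1 := by
  induction fuel generalizing node dist d with
  | zero => exact hi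
  | succ f ih =>
    simp only [pvWalk]
    simp only [pvSeq] at hmem
    split_ifs with h1 h2
    · exact hi
    · have h0 : 0 ≤ node ∧ node < (edges.length : Int) := by
        rcases pvPath_zero edges node f hpath with h | h
        · exact absurd h h1
        · exact h
      rw [if_neg h1, if_pos h2, List.mem_cons] at hmem
      have hmem1 : ¬ ((i : Int) = node) := fun h => hmem (Or.inl h)
      have hmem2 : (i : Int) ∉ pvSeq edges f (PySem.List.pyGetD edges node 0) (dist + 1) (PySem.List.pySetD d node dist) := fun h => hmem (Or.inr h)
      have hset : PySem.List.pySetD d node dist = d.set node.toNat dist :=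
        PySem.List.pySetD_of_nonneg d dist h0.1
      have hne : node.toNat ≠ i := fun he => hmem1 (by omega)
      have hsame : (d.set node.toNat dist).getD i 0 = d.getD i 0 := by
        simp [List.getD_eq_getElem?_getD, List.getElem?_set_ne hne]
      rw [hset] at hmem2 ⊢
      exact ih _ _ _ (pvPath_shift edges node f hpath h1 (by omega) h0.2)
        (hsame.trans hi) hmem2
    · exact hi

theorem pvLoopA1_eq (edges : List Int) (fuel : Nat) (node dist : Int)
    (d : List Int) (vis : List Bool)
    (hld : d.length = edges.length) (hlv : vis.length = edges.length)
    (hinv : ∀ j : Nat, j < edges.length →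
      (vis.getD j false = true ↔ d.getD j 0 ≠ (edges.length : Int) + 1))
    (hpath : ∀ k, k < fuel → pvW (edges.length : Int) ((pvStep edges)^[k] node))
    (hd : dist + fuel = (edges.length : Int) + 1) :
    (pvLoopA1 edges fuel node dist d vis).1 = pvWalk edges fuel node dist d := by
  induction fuel generalizing node dist d vis with
  | zero => rfl
  | succ f ih =>
    simp only [pvLoopA1, pvWalk]
    by_cases h1 : node = -1
    · simp [h1]
    · have h0 : -(edges.length : Int) ≤ node ∧ node < (edges.length : Int) := by
        rcases pvPath_zero edges node f hpath with h | h
        · exact absurd h h1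
        · exact h
      have hnn : pvIdx edges.length node < edges.length := pvIdx_lt edges.length node h0.1 h0.2
      have hgv : PySem.List.pyGetD vis node false = vis.getD (pvIdx edges.length node) false := by
        rw [pvGetD_idx vis false node (by omega) (by omega), hlv]
      have hgd : PySem.List.pyGetD d node 0 = d.getD (pvIdx edges.length node) 0 := by
        rw [pvGetD_idx d 0 node (by omega) (by omega), hld]
      rw [if_neg h1, if_neg h1]
      by_cases hv : vis.getD (pvIdx edges.length node) false = true
      · have hdne : ¬ (PySem.List.pyGetD d node 0 = (edges.length : Int) + 1) := by
          rw [hgd]; exact (hinv _ hnn).mp hv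
        rw [if_pos (by rw [hgv]; exact hv), if_neg hdne]
      · have hdeq : PySem.List.pyGetD d node 0 = (edges.length : Int) + 1 := by
          rw [hgd]
          by_contra hc
          exact hv ((hinv _ hnn).mpr hc)
        rw [if_neg (by rw [hgv]; simpa using hv), if_pos hdeq]
        have hsetd : PySem.List.pySetD d node dist = d.set (pvIdx edges.length node) dist := by
          rw [pvSetD_idx d node dist (by omega) (by omega), hld]
        have hsetv : PySem.List.pySetD vis node true = vis.set (pvIdx edges.length node) true := by
          rw [pvSetD_idx vis node true (by omega) (by omega), hlv]
        refine ih _ _ _ _ (by simp [hsetd, hld]) (by simp [hsetv, hlv]) ?_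
          (pvPath_shift edges node f hpath h1 h0.1 h0.2) (by push_cast at hd ⊢; omega)
        intro j hj
        rw [hsetd, hsetv]
        by_cases hjn : j = pvIdx edges.length node
        · subst hjn
          rw [List.getD_eq_getElem?_getD, List.getD_eq_getElem?_getD]
          simp [show pvIdx edges.length node < d.length by omega,
            show pvIdx edges.length node < vis.length by omega]
          push_cast at hd; omega
        · rw [List.getD_eq_getElem?_getD, List.getD_eq_getElem?_getD,
            List.getElem?_set_ne (by omega : pvIdx edges.length node ≠ j),
            List.getElem?_set_ne (by omega : pvIdx edges.length node ≠ j),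
            ← List.getD_eq_getElem?_getD, ← List.getD_eq_getElem?_getD]
          exact hinv j hj

theorem pvLoopA2_eq (edges : List Int) (fuel : Nat) (node : Int) (d1 : List Int)
    (res minDist dist : Int) (vis : List Bool) (dB : List Int)
    (hld : dB.length = edges.length) (hlv : vis.length = edges.length)
    (hinv : ∀ j : Nat, j < edges.length →
      (vis.getD j false = true ↔ dB.getD j 0 ≠ (edges.length : Int) + 1))
    (hpath : ∀ k, k < fuel → pvN (edges.length : Int) ((pvStep edges)^[k] node))
    (hd : dist + fuel = (edges.length : Int) + 1) :
    pvLoopA2 edges fuel node d1 res minDist dist vis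
      = (List.foldl (pvSel (pvKey d1 (pvWalk edges fuel node dist dB))) (res, minDist)
          (pvSeq edges fuel node dist dB)).1 := by
  induction fuel generalizing node dist vis dB res minDist with
  | zero => simp [pvLoopA2, pvSeq]
  | succ f ih =>
    simp only [pvLoopA2, pvSeq, pvWalk]
    by_cases h1 : node = -1
    · simp [h1]
    · have h0 : 0 ≤ node ∧ node < (edges.length : Int) := by
        rcases pvPath_zero edges node f hpath with h | h
        · exact absurd h h1
        · exact h
      have hnn : node.toNat < edges.length := by omega
      have hgv : PySem.List.pyGetD vis node false = vis.getD node.toNat false := by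
        rw [PySem.List.pyGetD_of_nonneg (xs := vis) (d := false) h0.1]
      have hgd : PySem.List.pyGetD dB node 0 = dB.getD node.toNat 0 := by
        rw [PySem.List.pyGetD_of_nonneg (xs := dB) (d := (0:Int)) h0.1]
      rw [if_neg h1, if_neg h1, if_neg h1]
      by_cases hv : vis.getD node.toNat false = true
      · have hdne : ¬ (PySem.List.pyGetD dB node 0 = (edges.length : Int) + 1) := by
          rw [hgd]; exact (hinv node.toNat hnn).mp hv
        rw [if_pos (by rw [hgv]; exact hv), if_neg hdne, if_neg hdne]
        rfl
      · have hdeq : PySem.List.pyGetD dB node 0 = (edges.length : Int) + 1 := by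
          rw [hgd]
          by_contra hc
          exact hv ((hinv node.toNat hnn).mpr hc)
        rw [if_neg (by rw [hgv]; simpa using hv), if_pos hdeq, if_pos hdeq]
        have hsetd : PySem.List.pySetD dB node dist = dB.set node.toNat dist :=
          PySem.List.pySetD_of_nonneg dB dist h0.1
        have hsetv : PySem.List.pySetD vis node true = vis.set node.toNat true :=
          PySem.List.pySetD_of_nonneg vis true h0.1
        have hdistne : dist ≠ (edges.length : Int) + 1 := by push_cast at hd; omega
        have hnext := pvPath_shift edges node f hpath h1 (by omega) h0.2
        -- the walk writes dist at node and never changes it again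
        have hself : (dB.set node.toNat dist).getD node.toNat 0 = dist := by
          rw [List.getD_eq_getElem?_getD]
          simp [hld ▸ hnn]
        have hwalkval :
            (pvWalk edges f (PySem.List.pyGetD edges node 0) (dist + 1)
              (PySem.List.pySetD dB node dist)).getD node.toNat 0 = dist := by
          rw [hsetd, pvWalk_preserve edges f _ _ _ (by simp [hld])
            (fun k hk => pvNW _ _ (hnext k hk)) node.toNat (by rw [hself]; exact hdistne)]
          exact hself
        have hkey : pvKey d1 (pvWalk edges f (PySem.List.pyGetD edges node 0) (dist + 1)
              (PySem.List.pySetD dB node dist)) node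
            = max (PySem.List.pyGetD d1 node 0) dist := by
          unfold pvKey
          rw [PySem.List.pyGetD_of_nonneg
            (xs := pvWalk edges f (PySem.List.pyGetD edges node 0) (dist + 1)
              (PySem.List.pySetD dB node dist)) (d := (0:Int)) h0.1, hwalkval]
        have hinv' : ∀ j : Nat, j < edges.length →
            ((vis.set node.toNat true).getD j false = true ↔
              (dB.set node.toNat dist).getD j 0 ≠ (edges.length : Int) + 1) := by
          intro j hj
          by_cases hjn : j = node.toNat
          · subst hjn
            rw [List.getD_eq_getElem?_getD, List.getD_eq_getElem?_getD]
            simp [hld ▸ hj, hlv ▸ hj]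
            exact hdistne
          · rw [List.getD_eq_getElem?_getD, List.getD_eq_getElem?_getD,
              List.getElem?_set_ne (by omega : node.toNat ≠ j),
              List.getElem?_set_ne (by omega : node.toNat ≠ j),
              ← List.getD_eq_getElem?_getD, ← List.getD_eq_getElem?_getD]
            exact hinv j hj
        rw [List.foldl_cons]
        have hsel : pvSel (pvKey d1 (pvWalk edges f (PySem.List.pyGetD edges node 0) (dist + 1)
              (PySem.List.pySetD dB node dist))) (res, minDist) node
            = if max (PySem.List.pyGetD d1 node 0) dist < minDist ∨
                (max (PySem.List.pyGetD d1 node 0) dist = minDist ∧ node < res) then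
                (node, max (PySem.List.pyGetD d1 node 0) dist)
              else (res, minDist) := by
          simp only [pvSel, hkey]
        by_cases hcond : max (PySem.List.pyGetD d1 node 0) dist < minDist ∨
            (max (PySem.List.pyGetD d1 node 0) dist = minDist ∧ node < res)
        · rw [if_pos hcond, hsel, if_pos hcond, hsetd, hsetv]
          exact ih _ _ _ _ _ _ (by simp [hld]) (by simp [hlv])
            (fun j hj => hinv' j hj) hnext (by push_cast at hd ⊢; omega)
        · rw [if_neg hcond, hsel, if_neg hcond, hsetd, hsetv]
          exact ih _ _ _ _ _ _ (by simp [hld]) (by simp [hlv])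
            (fun j hj => hinv' j hj) hnext (by push_cast at hd ⊢; omega)

theorem pvSel_rightcomm (k : Int → Int) :
    ∀ (s : Int × Int) (a b : Int), pvSel k (pvSel k s a) b = pvSel k (pvSel k s b) a := by
  intro s a b
  simp only [pvSel]
  split_ifs <;> simp_all [Prod.ext_iff] <;> omega

theorem foldl_pvSel_perm (k : Int → Int) {l l' : List Int} (h : l.Perm l') (s : Int × Int) :
    List.foldl (pvSel k) s l = List.foldl (pvSel k) s l' :=
  h.foldl_eq' (fun x _ y _ z => pvSel_rightcomm k z x y) s

theorem foldl_pvSel_inv (k : Int → Int) (N : Int) (l : List Int) (s : Int × Int)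
    (hl : ∀ i ∈ l, 0 ≤ i ∧ k i ≤ N + 1)
    (hs : s.2 ≤ N + 1 ∧ (s.2 = N + 1 → s.1 = -1)) :
    (List.foldl (pvSel k) s l).2 ≤ N + 1 ∧
      ((List.foldl (pvSel k) s l).2 = N + 1 → (List.foldl (pvSel k) s l).1 = -1) := by
  induction l generalizing s with
  | nil => exact hs
  | cons a t ih =>
    rw [List.foldl_cons]
    refine ih _ (fun i hi => hl i (List.mem_cons_of_mem a hi)) ?_
    have ha := hl a (List.mem_cons_self ..)
    simp only [pvSel]
    split_ifs with h
    · refine ⟨ha.2, fun he => ?_⟩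
      exfalso
      rcases h with h | h
      · omega
      · have := hs.2 (by omega)
        omega
    · exact hs

theorem foldl_pvSel_absorb (k : Int → Int) (N : Int) (l : List Int) (s : Int × Int)
    (hl : ∀ i ∈ l, 0 ≤ i ∧ k i = N + 1)
    (hs : s.2 ≤ N + 1 ∧ (s.2 = N + 1 → s.1 = -1)) :
    List.foldl (pvSel k) s l = s := by
  induction l generalizing s with
  | nil => rfl
  | cons a t ih =>
    rw [List.foldl_cons]
    have ha := hl a (List.mem_cons_self ..)
    have hkeep : pvSel k s a = s := by
      simp only [pvSel]
      rw [if_neg]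
      intro hcon
      rcases hcon with h | h
      · omega
      · have := hs.2 (by omega)
        omega
    rw [hkeep]
    exact ih _ (fun i hi => hl i (List.mem_cons_of_mem a hi)) hs

theorem foldl_b_eq_sel (k : Int → Int) (l : List Int) (s : Int × Int)
    (hp : l.Pairwise (· < ·)) (hs : ∀ i ∈ l, s.1 < i) :
    List.foldl (fun (s : Int × Int) i => if k i < s.2 then (i, k i) else s) s l
      = List.foldl (pvSel k) s l := by
  induction l generalizing s with
  | nil => rfl
  | cons a t ih =>
    rw [List.foldl_cons, List.foldl_cons]
    rcases List.pairwise_cons.mp hp with ⟨hat, ht⟩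
    have hsa := hs a (List.mem_cons_self ..)
    by_cases h : k a < s.2
    · rw [if_pos h]
      have : pvSel k s a = (a, k a) := by
        simp only [pvSel]
        rw [if_pos (Or.inl h)]
      rw [this]
      exact ih _ ht (fun i hi => hat i hi)
    · rw [if_neg h]
      have : pvSel k s a = s := by
        simp only [pvSel]
        rw [if_neg]
        intro hcon
        rcases hcon with hc | hc
        · exact h hc
        · omega
      rw [this]
      exact ih _ ht (fun i hi => hs i (List.mem_cons_of_mem a hi))

theorem main_eq (edges : List Int) (node1 node2 : Int)
    (hp1 : ∀ k : Nat, k ≤ edges.length → ((pvStep edges)^[k] node1 = -1 ∨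
      (-(edges.length : Int) ≤ (pvStep edges)^[k] node1 ∧ (pvStep edges)^[k] node1 < (edges.length : Int))))
    (hp2 : ∀ k : Nat, k ≤ edges.length → ((pvStep edges)^[k] node2 = -1 ∨
      (0 ≤ (pvStep edges)^[k] node2 ∧ (pvStep edges)^[k] node2 < (edges.length : Int)))) :
    closestMeetingNode edges node1 node2 = closestMeetingNode_alt edges node1 node2 := by
  set L := edges.length with hL
  set N : Int := (L : Int) with hN
  have hpath1 : ∀ k, k < L + 1 → pvW N ((pvStep edges)^[k] node1) :=
    fun k hk => hp1 k (by omega)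
  have hpath2 : ∀ k, k < L + 1 → pvN N ((pvStep edges)^[k] node2) :=
    fun k hk => hp2 k (by omega)
  have hfuel : (0 : Int) + ((L + 1 : Nat) : Int) = N + 1 := by push_cast; ring
  set d0 : List Int := List.replicate L (N + 1) with hd0
  set v0 : List Bool := List.replicate L false with hv0
  have hld0 : d0.length = L := by simp [hd0]
  have hlv0 : v0.length = L := by simp [hv0]
  have hinv0 : ∀ j : Nat, j < L →
      (v0.getD j false = true ↔ d0.getD j 0 ≠ N + 1) := by
    intro j hj
    rw [hd0, hv0, List.getD_eq_getElem?_getD, List.getD_eq_getElem?_getD]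
    simp [hj]
  have hall0 : ∀ j : Nat, d0.getD j 0 ≤ N + 1 := by
    intro j
    rw [hd0, List.getD_eq_getElem?_getD]
    by_cases hj : j < L
    · simp [hj]
    · rw [List.getElem?_eq_none (by simpa using hj)]
      simp
      omega
  set D1 : List Int := pvWalk edges (L + 1) node1 0 d0 with hD1
  set DF : List Int := pvWalk edges (L + 1) node2 0 d0 with hDF
  set S : List Int := pvSeq edges (L + 1) node2 0 d0 with hS
  set k : Int → Int := pvKey D1 DF with hk
  -- A's side
  have hA1 : (pvLoopA1 edges (L + 1) node1 0 d0 v0).1 = D1 :=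
    pvLoopA1_eq edges (L + 1) node1 0 d0 v0 hld0 hlv0 hinv0 hpath1 hfuel
  have hA : closestMeetingNode edges node1 node2 = (List.foldl (pvSel k) (-1, N + 1) S).1 := by
    show pvLoopA2 edges (L + 1) node2
      (pvLoopA1 edges (L + 1) node1 0 d0 v0).1 (-1) (N + 1) 0 v0
      = (List.foldl (pvSel k) (-1, N + 1) S).1
    rw [hA1]
    exact pvLoopA2_eq edges (L + 1) node2 D1 (-1) (N + 1) 0 v0 d0 hld0 hlv0 hinv0 hpath2 hfuel
  -- B's side
  have hB : closestMeetingNode_alt edges node1 node2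
      = (List.foldl (pvSel k) (-1, N + 1) (PySem.List.pyRange 0 N 1)).1 := by
    show ((PySem.List.pyRange 0 N 1).foldl (fun (s : Int × Int) i =>
        let r := max (PySem.List.pyGetD D1 i 0) (PySem.List.pyGetD DF i 0)
        if r < s.2 then (i, r) else s) (-1, N + 1)).1
      = (List.foldl (pvSel k) (-1, N + 1) (PySem.List.pyRange 0 N 1)).1
    rw [show (fun (s : Int × Int) i =>
        let r := max (PySem.List.pyGetD D1 i 0) (PySem.List.pyGetD DF i 0)
        if r < s.2 then (i, r) else s)
      = (fun (s : Int × Int) i => if k i < s.2 then (i, k i) else s) from by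
        funext s i
        simp [hk, pvKey]]
    rw [foldl_b_eq_sel k (PySem.List.pyRange 0 N 1) (-1, N + 1)
      (PySem.List.pairwise_lt_pyRange_one 0 N)]
    intro i hi
    have := PySem.List.mem_pyRange_one.mp hi
    omega
  -- keys of visited nodes are bounded, keys of unvisited nodes are N + 1
  have hkey_le : ∀ i ∈ S, 0 ≤ i ∧ k i ≤ N + 1 := by
    intro i hi
    have hgood := pvSeq_good edges (L + 1) node2 0 d0 hpath2 i hi
    refine ⟨hgood.1, ?_⟩
    rw [hk, pvKey, PySem.List.pyGetD_of_nonneg (xs := D1) (d := (0:Int)) hgood.1,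
      PySem.List.pyGetD_of_nonneg (xs := DF) (d := (0:Int)) hgood.1]
    have h1 := pvWalk_le edges (L + 1) node1 0 d0 hld0 (fun j hj => hpath1 j hj) hall0 hfuel i.toNat
    have h2 := pvWalk_le edges (L + 1) node2 0 d0 hld0
      (fun j hj => pvNW _ _ (hpath2 j hj)) hall0 hfuel i.toNat
    rw [← hD1] at h1
    rw [← hDF] at h2
    exact max_le h1 h2
  have hstinv := foldl_pvSel_inv k N S (-1, N + 1) hkey_le ⟨le_refl _, fun _ => rfl⟩
  -- the permutation argument
  set P : List Int := PySem.List.pyRange 0 N 1 with hP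
  set rest : List Int := P.filter (fun i => !(decide (i ∈ S))) with hrest
  have hSnodup : S.Nodup := pvSeq_nodup edges (L + 1) node2 0 d0 hpath2 hld0 hfuel
  have hperm2 : List.Perm (P.filter (fun i => decide (i ∈ S))) S := by
    refine (List.perm_ext_iff_of_nodup (List.Nodup.filter _ ?_) hSnodup).mpr ?_
    · exact PySem.List.nodup_pyRange_one 0 N
    · intro a
      simp only [List.mem_filter, decide_eq_true_eq]
      constructor
      · exact fun h => h.2
      · intro h
        refine ⟨?_, h⟩
        have := pvSeq_good edges (L + 1) node2 0 d0 hpath2 a h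
        rw [hP]
        exact PySem.List.mem_pyRange_one.mpr ⟨this.1, this.2⟩
  have hperm : List.Perm P (S ++ rest) := by
    have h1 := List.filter_append_perm (fun i => decide (i ∈ S)) P
    exact (h1.symm.trans (List.Perm.append hperm2 (List.Perm.refl rest))).symm.symm
  have habs : ∀ i ∈ rest, 0 ≤ i ∧ k i = N + 1 := by
    intro i hi
    rw [hrest, List.mem_filter] at hi
    have hiP := PySem.List.mem_pyRange_one.mp hi.1
    have hnotS : i ∉ S := by simpa using hi.2
    refine ⟨hiP.1, ?_⟩
    have hd0i : d0.getD i.toNat 0 = N + 1 := by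
      rw [hd0, List.getD_eq_getElem?_getD]
      simp [(by omega : i.toNat < L)]
    have hDFi : DF.getD i.toNat 0 = N + 1 := by
      rw [hDF]
      exact pvWalk_unreached edges (L + 1) node2 0 d0 hpath2 i.toNat hd0i
        (by rw [(by omega : ((i.toNat : Int)) = i)]; exact hnotS)
    have hD1i := pvWalk_le edges (L + 1) node1 0 d0 hld0 (fun j hj => hpath1 j hj) hall0 hfuel i.toNat
    rw [← hD1] at hD1i
    rw [hk, pvKey, PySem.List.pyGetD_of_nonneg (xs := D1) (d := (0:Int)) hiP.1,
      PySem.List.pyGetD_of_nonneg (xs := DF) (d := (0:Int)) hiP.1, hDFi]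
    exact max_eq_right hD1i
  calc closestMeetingNode edges node1 node2
      = (List.foldl (pvSel k) (-1, N + 1) S).1 := hA
    _ = (List.foldl (pvSel k) (List.foldl (pvSel k) (-1, N + 1) S) rest).1 := by
        rw [foldl_pvSel_absorb k N rest _ habs hstinv]
    _ = (List.foldl (pvSel k) (-1, N + 1) (S ++ rest)).1 := by rw [List.foldl_append]
    _ = (List.foldl (pvSel k) (-1, N + 1) P).1 := by
        rw [foldl_pvSel_perm k hperm.symm]
    _ = closestMeetingNode_alt edges node1 node2 := hB.symm

-- ===== VERDICT (by name: the statement is the Claim_ definition above) =====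
theorem closestMeetingNode_spec : Claim_equal_closestMeetingNode := by
  intro edges node1 node2 _ hpre
  have h := hpre
  unfold Pre_closestMeetingNode at h
  unfold Spec_closestMeetingNode
  exact main_eq edges node1 node2 h.1 h.2
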